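-- pv_equiv track=rewrite | github.com/ligulfzhou/onepiece | one_piece/one_piece/util/helper.py | bytes2hex
-- ===== SOURCE A (Python) =====
-- def bytes2hex(bytes):
--     num = len(bytes)
--     hexstr = ''
--
--     for i in range(num):
--         t = '%x' % bytes[i]
--         if len(t) % 2:
--             hexstr += '0'
--         hexstr += t
--     return hexstr.upper()
-- ===== SOURCE B (Python) =====
-- # bytes2hex: uppercase hex of a sequence of byte values, as a join of per-element
-- # even-length chunks whose digits are extracted directly by divmod-16.
-- _DIGITS = '0123456789ABCDEF'
--
--
-- def _hex_chunk(b):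
--     ds = ''
--     while b >= 16:
--         ds = _DIGITS[b % 16] + ds
--         b //= 16
--     ds = _DIGITS[b] + ds
--     if len(ds) % 2:
--         ds = '0' + ds
--     return ds
--
--
-- def bytes2hex(bytes):
--     return ''.join(_hex_chunk(b) for b in bytes)
-- ===== Notes on version B (the rewrite author's own statement) =====
-- stated objective: alternative
-- what changed: B replaces A's per-index loop growing one string via printf '%x' plus a final .upper() by a join of per-element chunks whose uppercase digits are extracted directly by divmod-16; Pre_ restricts to lists of nonnegative ints, the natural domain of a byte-to-hex helper, excluding negatives on which A's '%x' sign output is accidental.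
-- outside the precondition, e.g. on bytes2hex([-10]): A returns '-A', B returns '06'
import Mathlib
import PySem

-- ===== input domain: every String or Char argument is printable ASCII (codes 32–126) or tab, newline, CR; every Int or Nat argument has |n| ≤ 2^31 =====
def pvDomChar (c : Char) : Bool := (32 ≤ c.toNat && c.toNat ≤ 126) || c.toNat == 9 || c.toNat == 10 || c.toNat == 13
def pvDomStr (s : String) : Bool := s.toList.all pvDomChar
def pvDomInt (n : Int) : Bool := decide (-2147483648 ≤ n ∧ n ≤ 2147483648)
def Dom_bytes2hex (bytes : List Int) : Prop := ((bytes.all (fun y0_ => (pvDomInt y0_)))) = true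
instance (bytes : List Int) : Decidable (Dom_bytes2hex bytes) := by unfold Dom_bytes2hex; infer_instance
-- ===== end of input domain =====

-- B replaces A's per-index printf-'%x' loop with a final .upper() by a join of
-- per-element chunks whose uppercase digits are extracted directly by divmod-16
-- (objective: alternative decomposition, similar cost).

-- ===== PORT A =====

-- hand port of Python "'%x' % n" (no PySem primitive): lowercase hex digits of |n|,
-- '-' prefix for a negative n, "0" for 0 — exact for every Python int
def pvHexDigitsL (n : Nat) : List Char :=
  if _h : n = 0 then []
  else pvHexDigitsL (n / 16) ++
    [(['0','1','2','3','4','5','6','7','8','9','a','b','c','d','e','f'].getD (n % 16) '0')]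
decreasing_by exact Nat.div_lt_self (Nat.pos_of_ne_zero _h) (by omega)

def pvPctX (n : Int) : List Char :=
  if n < 0 then '-' :: pvHexDigitsL n.natAbs
  else if n = 0 then ['0'] else pvHexDigitsL n.toNat

def bytes2hex (bytes : List Int) : String :=
  let num := PySem.List.len bytes
  let hexstr : List Char := []
  let hexstr := (PySem.List.pyRange 0 num 1).foldl (fun hexstr i =>
    let t := pvPctX (PySem.List.pyGetD bytes i 0)
    let hexstr := if t.length % 2 = 1 then hexstr ++ ['0'] else hexstr
    hexstr ++ t) hexstr
  String.ofList (PySem.Chars.upper hexstr)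

-- ===== PORT B =====

def pvDigits : List Char := ['0','1','2','3','4','5','6','7','8','9','A','B','C','D','E','F']

-- Source B's while-loop: prepend digits while b >= 16; returns the grown string and the final b
def pvChunkLoop (ds : List Char) (b : Int) : List Char × Int :=
  if _h : 16 ≤ b then
    pvChunkLoop (PySem.List.pyGetD pvDigits (PySem.Int.mod b 16) '0' :: ds)
      (PySem.Int.floordiv b 16)
  else (ds, b)
termination_by b.toNat
decreasing_by
  rw [PySem.Int.floordiv_eq_ediv_of_pos (by omega)]
  omega

def pvHexChunk (b : Int) : List Char :=
  let p := pvChunkLoop [] b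
  let ds := PySem.List.pyGetD pvDigits p.2 '0' :: p.1
  if ds.length % 2 = 1 then '0' :: ds else ds

def bytes2hex_alt (bytes : List Int) : String :=
  String.ofList (bytes.flatMap pvHexChunk)

-- ===== PRECONDITION & SPEC =====
-- Pre_ restricts to lists of NONNEGATIVE ints — the natural domain of a byte-to-hex
-- helper; on negative elements A's '%x' sign output ('-A') is an accident of printf
-- formatting that B's digit-extraction algorithm has no reason to reproduce.
def Pre_bytes2hex (bytes : List Int) : Prop := ∀ b ∈ bytes, (0:Int) ≤ b
instance (bytes : List Int) : Decidable (Pre_bytes2hex bytes) := by unfold Pre_bytes2hex; infer_instance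
def pvWitness_bytes2hex : List Int := [0, 255, 16, 4096]

def Spec_bytes2hex (bytes : List Int) (out : String) : Prop := out = bytes2hex_alt bytes
instance (bytes : List Int) (out : String) : Decidable (Spec_bytes2hex bytes out) := by unfold Spec_bytes2hex; infer_instance

-- ===== CLAIM =====
def Claim_equal_bytes2hex : Prop := ∀ (bytes : List Int), Dom_bytes2hex bytes → Pre_bytes2hex bytes → Spec_bytes2hex bytes (bytes2hex bytes)

-- ===== LEMMAS AND PROOFS =====

-- A's padded lowercase chunk for one element
def pvChunkL (b : Int) : List Char :=
  if (pvPctX b).length % 2 = 1 then '0' :: pvPctX b else pvPctX b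

def pvDigitU (d : Nat) : Char := pvDigits.getD d '0'

-- uppercase hex digits of a Nat (single digit for m < 16)
def pvHexDigitsU (m : Nat) : List Char :=
  if _h : m < 16 then [pvDigitU m]
  else pvHexDigitsU (m / 16) ++ [pvDigitU (m % 16)]
decreasing_by exact Nat.div_lt_self (by omega) (by omega)

theorem pvDigit_upper (d : Nat) (hd : d < 16) :
    pvDigitU d =
      PySem.Chars.upperChar
        ((['0','1','2','3','4','5','6','7','8','9','a','b','c','d','e','f'])[d]?.getD '0') := by
  interval_cases d <;> decide

theorem pvHexDigitsU_eq (m : Nat) :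
    pvHexDigitsU m =
      PySem.Chars.upper (if m = 0 then ['0'] else pvHexDigitsL m) := by
  induction m using Nat.strong_induction_on with
  | _ m ih =>
    rw [pvHexDigitsU]
    by_cases h16 : m < 16
    · simp only [h16, dif_pos]
      by_cases h0 : m = 0
      · subst h0; decide
      · rw [if_neg h0, pvHexDigitsL, dif_neg h0, pvHexDigitsL]
        have h : m / 16 = 0 := Nat.div_eq_of_lt h16
        rw [h]
        simp [PySem.Chars.upper, Nat.mod_eq_of_lt h16]
        exact pvDigit_upper m h16
    · have hm0 : m ≠ 0 := by omega
      rw [dif_neg h16, if_neg hm0, pvHexDigitsL, dif_neg hm0]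
      have hq0 : m / 16 ≠ 0 := by
        intro h; have := Nat.div_eq_of_lt (by omega : m < 16); omega
      rw [ih (m / 16) (Nat.div_lt_self (by omega) (by omega)), if_neg hq0]
      simp [PySem.Chars.upper]
      exact pvDigit_upper _ (Nat.mod_lt m (by omega))

-- B's loop, on a Nat input, computes exactly the uppercase digit list
theorem pvChunkCore (n : Nat) (ds : List Char) :
    PySem.List.pyGetD pvDigits (pvChunkLoop ds (n:Int)).2 '0' :: (pvChunkLoop ds (n:Int)).1
      = pvHexDigitsU n ++ ds := by
  induction n using Nat.strong_induction_on generalizing ds with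
  | _ n ih =>
    rw [pvChunkLoop]
    by_cases h16 : n < 16
    · rw [dif_neg (by exact_mod_cast (by omega : ¬ (16:Int) ≤ (n:Int)))]
      rw [pvHexDigitsU, dif_pos h16]
      simp [pvDigitU]
    · rw [dif_pos (by exact_mod_cast (by omega : (16:Int) ≤ (n:Int)))]
      have hm : PySem.Int.mod (n:Int) 16 = ((n % 16 : Nat) : Int) := by
        rw [PySem.Int.mod_eq_emod_of_pos (by norm_num)]; omega
      have hd : PySem.Int.floordiv (n:Int) 16 = ((n / 16 : Nat) : Int) := by
        rw [PySem.Int.floordiv_eq_ediv_of_pos (by norm_num)]; omega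
      rw [hm, hd, ih (n / 16) (Nat.div_lt_self (by omega) (by omega))]
      conv_rhs => rw [pvHexDigitsU]
      rw [dif_neg h16]
      simp [pvDigitU]
      rw [show ((n:Int) % 16) = ((n % 16 : Nat) : Int) from by omega,
        PySem.List.pyGetD_natCast]
      rfl

theorem pvChunk_upper (b : Int) (hb : 0 ≤ b) :
    PySem.Chars.upper (pvChunkL b) = pvHexChunk b := by
  have hUds : PySem.Chars.upper (pvPctX b) = pvHexDigitsU b.toNat := by
    unfold pvPctX
    rw [if_neg (by omega)]
    by_cases h0 : b = 0
    · subst h0; rw [if_pos rfl, pvHexDigitsU_eq]; simp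
    · rw [if_neg h0, pvHexDigitsU_eq, if_neg (by omega)]
  have hB : pvHexChunk b =
      (if (pvHexDigitsU b.toNat).length % 2 = 1
       then '0' :: pvHexDigitsU b.toNat else pvHexDigitsU b.toNat) := by
    unfold pvHexChunk
    have hcast : (b : Int) = ((b.toNat : Nat) : Int) := by omega
    rw [hcast]
    have := pvChunkCore b.toNat []
    rw [List.append_nil] at this
    simp only [this]
    rw [show ((b.toNat : Int)).toNat = b.toNat from by omega]
  rw [hB]
  have hlen : (pvPctX b).length = (pvHexDigitsU b.toNat).length := by
    rw [← hUds]; simp [PySem.Chars.upper]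
  unfold pvChunkL
  by_cases hodd : (pvPctX b).length % 2 = 1
  · rw [if_pos hodd, if_pos (hlen ▸ hodd)]
    simp only [PySem.Chars.upper, List.map_cons] at hUds ⊢
    simp [hUds, show PySem.Chars.upperChar '0' = '0' from by decide]
  · rw [if_neg hodd, if_neg (hlen ▸ hodd)]
    exact hUds

theorem pvFold_eq (bytes : List Int) (acc : List Char) :
    List.foldl (fun hexstr b =>
        (if (pvPctX b).length % 2 = 1 then hexstr ++ ['0'] else hexstr) ++ pvPctX b)
      acc bytes = acc ++ bytes.flatMap pvChunkL := by
  have hf : (fun (hexstr : List Char) b =>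
      (if (pvPctX b).length % 2 = 1 then hexstr ++ ['0'] else hexstr) ++ pvPctX b) =
      fun hexstr b => hexstr ++ pvChunkL b := by
    funext hexstr b
    unfold pvChunkL
    split_ifs <;> simp
  rw [hf, PySem.List.foldl_append_eq_flatMap]

theorem bytes2hex_eq (bytes : List Int) (hpre : ∀ b ∈ bytes, (0:Int) ≤ b) :
    bytes2hex bytes = bytes2hex_alt bytes := by
  show String.ofList (PySem.Chars.upper
      (List.foldl (fun hexstr i =>
        (if (pvPctX (PySem.List.pyGetD bytes i 0)).length % 2 = 1 then hexstr ++ ['0'] else hexstr)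
          ++ pvPctX (PySem.List.pyGetD bytes i 0)) [] (PySem.List.pyRange 0 (PySem.List.len bytes) 1)))
    = String.ofList (List.flatMap pvHexChunk bytes)
  have hfold :
      List.foldl (fun hexstr i =>
          (if (pvPctX (PySem.List.pyGetD bytes i 0)).length % 2 = 1 then hexstr ++ ['0'] else hexstr)
            ++ pvPctX (PySem.List.pyGetD bytes i 0)) ([] : List Char)
          (PySem.List.pyRange 0 (PySem.List.len bytes) 1)
        = List.foldl (fun hexstr b =>
            (if (pvPctX b).length % 2 = 1 then hexstr ++ ['0'] else hexstr) ++ pvPctX b) [] bytes :=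
    PySem.List.foldl_pyRange_zero_pyGetD bytes 0
      (fun hexstr b =>
        (if (pvPctX b).length % 2 = 1 then hexstr ++ ['0'] else hexstr) ++ pvPctX b) []
  rw [hfold, pvFold_eq, List.nil_append]
  congr 1
  rw [PySem.Chars.upper, List.map_flatMap]
  exact List.flatMap_congr (fun b hb => pvChunk_upper b (hpre b hb))

-- ===== VERDICT =====
theorem bytes2hex_spec : Claim_equal_bytes2hex := by
  intro bytes _ hpre
  unfold Spec_bytes2hex
  exact bytes2hex_eq bytes hpre
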